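-- pv_equiv track=rewrite | github.com/Jerempire/gym-anything | benchmarks/cua_world/environments/tiddly_wiki_env/tasks/create_service_dependency_map/verifier.py | parse_tiddler_content
-- ===== SOURCE A (Python) =====
-- def parse_tiddler_content(raw_content):
--     """Parse a .tid file content into fields and body."""
--     fields = {}
--     body = ""
--     lines = raw_content.split('\n')
--     in_body = False
--
--     for line in lines:
--         if in_body:
--             body += line + "\n"
--         elif line.strip() == "":
--             in_body = True
--         else:
--             if ":" in line:
--                 key, val = line.split(":", 1)
--                 fields[key.strip().lower()] = val.strip()
--
--     return fields, body.strip()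
-- ===== SOURCE B (Python) =====
-- def parse_tiddler_content(raw_content):
--     """Parse a .tid file content into fields and body (two-phase: locate the
--     separator line first, then process the header and body slices)."""
--     lines = raw_content.split('\n')
--     sep = next((i for i, line in enumerate(lines) if line.strip() == ''), None)
--     header = lines if sep is None else lines[:sep]
--     fields = {}
--     for line in header:
--         if ':' in line:
--             key, val = line.split(':', 1)
--             fields[key.strip().lower()] = val.strip()
--     body = '' if sep is None else '\n'.join(lines[sep + 1:])
--     return fields, body.strip()
-- ===== Notes on version B (the rewrite author's own statement) =====
-- stated objective: alternative
-- what changed: A threads an in_body flag through one stateful pass that concatenates the body line by line; B first locates the separator (first line that strips to empty), then parses only the header slice into fields and joins the body slice in one step, with no mode flag.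
import Mathlib
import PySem

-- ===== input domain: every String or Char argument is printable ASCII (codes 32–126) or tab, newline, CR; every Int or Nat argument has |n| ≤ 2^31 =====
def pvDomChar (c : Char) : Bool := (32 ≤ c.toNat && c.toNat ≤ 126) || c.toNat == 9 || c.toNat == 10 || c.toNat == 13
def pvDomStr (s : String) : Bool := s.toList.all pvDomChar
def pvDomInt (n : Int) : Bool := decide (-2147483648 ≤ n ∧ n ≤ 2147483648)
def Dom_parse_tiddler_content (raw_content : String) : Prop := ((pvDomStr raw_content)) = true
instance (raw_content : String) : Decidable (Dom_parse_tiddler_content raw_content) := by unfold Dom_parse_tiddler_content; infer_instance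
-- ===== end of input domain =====

-- ===== PORT A =====
-- B changes the decomposition (two-phase: find separator, then handle the two slices) instead of
-- A's one stateful pass with an in_body flag; same cost, no speed claim.
def pvStepA (st : PySem.Dict String String × List Char × Bool) (line : String) :
    PySem.Dict String String × List Char × Bool :=
  if st.2.2 then (st.1, st.2.1 ++ line.toList ++ ['\n'], st.2.2)
  else if PySem.Str.strip line == "" then (st.1, st.2.1, true)
  else if PySem.Str.isIn ":" line then
    match PySem.Str.splitMax? line ":" 1 with
    | some (key :: val :: _) =>
        (st.1.insert (PySem.Str.lower (PySem.Str.strip key)) (PySem.Str.strip val), st.2.1, st.2.2)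
    | _ => (st.1, st.2.1, st.2.2)
  else (st.1, st.2.1, st.2.2)

def parse_tiddler_content (raw_content : String) : (List (String × String)) × String :=
  let lines := (PySem.Str.split? raw_content "\n").getD []   -- sep "\n" ≠ "", so split? is always some
  let res := lines.foldl pvStepA (PySem.Dict.empty, [], false)
  (res.1.items, String.ofList (PySem.Chars.strip res.2.1))

-- ===== PORT B =====
def pvFieldStep (d : PySem.Dict String String) (line : String) : PySem.Dict String String :=
  if PySem.Str.isIn ":" line then
    match PySem.Str.splitMax? line ":" 1 with
    | some (key :: val :: _) =>
        d.insert (PySem.Str.lower (PySem.Str.strip key)) (PySem.Str.strip val)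
    | _ => d
  else d

def parse_tiddler_content_alt (raw_content : String) : (List (String × String)) × String :=
  let lines := (PySem.Str.split? raw_content "\n").getD []
  let sep? := lines.findIdx? (fun l => PySem.Str.strip l == "")
  let header := match sep? with | none => lines | some i => lines.take i
  let fields := header.foldl pvFieldStep PySem.Dict.empty
  let body := match sep? with | none => "" | some i => PySem.Str.join "\n" (lines.drop (i + 1))
  (fields.items, PySem.Str.strip body)

-- ===== PRECONDITION & SPEC =====
def Spec_parse_tiddler_content (raw_content : String) (out : (List (String × String)) × String) : Prop := out = parse_tiddler_content_alt raw_content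
instance (raw_content : String) (out : (List (String × String)) × String) : Decidable (Spec_parse_tiddler_content raw_content out) := by unfold Spec_parse_tiddler_content; infer_instance

-- ===== CLAIM (what is proved, stated in full; the proofs are below) =====
def Claim_equal_parse_tiddler_content : Prop := ∀ (raw_content : String), Dom_parse_tiddler_content raw_content → Spec_parse_tiddler_content raw_content (parse_tiddler_content raw_content)

-- ===== LEMMAS AND PROOFS =====

-- the flat body accumulated by A once in_body is set
def pvFlat (ls : List String) : List Char := ls.flatMap (fun l => l.toList ++ ['\n'])

theorem pvFoldA_true (ls : List String) (d : PySem.Dict String String) (b : List Char) :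
    ls.foldl pvStepA (d, b, true) = (d, b ++ pvFlat ls, true) := by
  induction ls generalizing b with
  | nil => simp [pvFlat]
  | cons l rest ih => simp [pvStepA, pvFlat, ih, List.flatMap_cons]

theorem pvFoldA_false (ls : List String) (d : PySem.Dict String String) (b : List Char) :
    ls.foldl pvStepA (d, b, false) =
      match ls.findIdx? (fun l => PySem.Str.strip l == "") with
      | none => (ls.foldl pvFieldStep d, b, false)
      | some i => ((ls.take i).foldl pvFieldStep d, b ++ pvFlat (ls.drop (i + 1)), true) := by
  induction ls generalizing d b with
  | nil => simp
  | cons l rest ih =>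
    by_cases hp : PySem.Str.strip l == ""
    · simp [List.findIdx?_cons, hp, pvStepA, pvFoldA_true]
    · have hstep : pvStepA (d, b, false) l = (pvFieldStep d l, b, false) := by
        simp only [pvStepA, pvFieldStep, hp, if_false, Bool.false_eq_true]
        split
        · split <;> rfl
        · rfl
      rw [List.foldl_cons, hstep, ih]
      simp only [List.findIdx?_cons, hp, if_false, Bool.false_eq_true]
      cases h : rest.findIdx? (fun l => PySem.Str.strip l == "") with
      | none => simp
      | some i => simp

theorem pvIsspace_newline : PySem.Chars.isspace '\n' = true := by decide

theorem pvRstrip_append_newline (xs : List Char) :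
    PySem.Chars.rstrip (xs ++ ['\n']) = PySem.Chars.rstrip xs := by
  simp [PySem.Chars.rstrip, pvIsspace_newline]

theorem pvStrip_append_newline (xs : List Char) :
    PySem.Chars.strip (xs ++ ['\n']) = PySem.Chars.strip xs := by
  unfold PySem.Chars.strip PySem.Chars.lstrip
  rw [List.dropWhile_append]
  by_cases he : (List.dropWhile PySem.Chars.isspace xs).isEmpty
  · simp [pvIsspace_newline, List.isEmpty_iff.mp he, PySem.Chars.rstrip]
  · rw [if_neg he, pvRstrip_append_newline]

theorem pvFlat_eq_join (ls : List String) (h : ls ≠ []) :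
    pvFlat ls = PySem.Chars.join ['\n'] (ls.map String.toList) ++ ['\n'] := by
  induction ls with
  | nil => exact absurd rfl h
  | cons x rest ih =>
    cases rest with
    | nil => simp [pvFlat, PySem.Chars.join, List.intercalate]
    | cons y r =>
      simp only [pvFlat, List.flatMap_cons] at ih ⊢
      rw [ih (by simp)]
      simp [PySem.Chars.join, List.intercalate]

-- ===== VERDICT (by name: the statement is the Claim_ definition above) =====
theorem parse_tiddler_content_spec : Claim_equal_parse_tiddler_content := by
  intro raw _
  unfold Spec_parse_tiddler_content parse_tiddler_content parse_tiddler_content_alt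
  simp only [pvFoldA_false]
  cases h : ((PySem.Str.split? raw "\n").getD []).findIdx? (fun l => PySem.Str.strip l == "") with
  | none => simp [PySem.Chars.strip, PySem.Chars.lstrip, PySem.Chars.rstrip, PySem.Str.strip]
  | some i =>
    simp only
    cases htail : ((PySem.Str.split? raw "\n").getD []).drop (i + 1) with
    | nil =>
      simp [pvFlat, PySem.Chars.strip, PySem.Chars.lstrip, PySem.Chars.rstrip,
        PySem.Str.strip, PySem.Str.join, PySem.Chars.join, List.intercalate]
    | cons x r =>
      rw [pvFlat_eq_join _ (by simp), List.nil_append, pvStrip_append_newline]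
      simp [PySem.Str.strip, PySem.Str.join, PySem.Chars.join]
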